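-- pv_equiv track=rewrite | github.com/morvarid-L-noor/digital-image-processing-2 | q4_dip_hw2.py | plotting
-- ===== SOURCE A (Python) =====
-- def plotting(A,B):
--   f = []
--   for i in range(255):
--     if( i < A):
--       f.append(0)
--     elif( i > B):
--       f.append(0)
--     else:
--       f.append(i)
--   return f
-- ===== SOURCE B (Python) =====
-- def plotting(A, B):
--     lo = max(0, A)
--     hi = min(254, B)
--     if hi < lo:
--         return [0] * 255
--     return [0] * lo + list(range(lo, hi + 1)) + [0] * (254 - hi)
-- ===== Notes on version B (the rewrite author's own statement) =====
-- stated objective: simpler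
-- what changed: Replaces the per-index conditional loop over all 255 values with a direct three-segment construction: a zero prefix, the identity ramp range(lo,hi+1), and a zero suffix.
import Mathlib
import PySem

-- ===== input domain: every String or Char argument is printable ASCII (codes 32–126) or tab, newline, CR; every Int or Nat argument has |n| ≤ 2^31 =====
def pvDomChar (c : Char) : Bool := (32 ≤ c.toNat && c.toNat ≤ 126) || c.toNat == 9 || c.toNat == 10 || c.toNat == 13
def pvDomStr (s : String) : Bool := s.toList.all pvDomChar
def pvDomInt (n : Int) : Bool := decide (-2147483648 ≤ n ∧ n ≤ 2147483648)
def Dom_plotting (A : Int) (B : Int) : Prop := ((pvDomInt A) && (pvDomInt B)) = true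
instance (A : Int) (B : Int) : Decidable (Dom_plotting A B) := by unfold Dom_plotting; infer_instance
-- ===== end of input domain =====

-- B replaces the per-index conditional loop with a three-segment construction (zeros, identity ramp, zeros); objective: simpler.

-- ===== PORT A =====
def plotting (A : Int) (B : Int) : List Int :=
  (PySem.List.pyRange 0 255 1).foldl
    (fun f i => if i < A then f ++ [0] else if i > B then f ++ [0] else f ++ [i]) []

-- ===== PORT B =====
def plotting_alt (A : Int) (B : Int) : List Int :=
  let lo := max 0 A
  let hi := min 254 B
  if hi < lo then List.replicate 255 0
  else List.replicate lo.toNat 0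
       ++ (List.range' lo.toNat (hi + 1 - lo).toNat).map (fun n : Nat => (n : Int))
       ++ List.replicate (254 - hi).toNat 0

-- ===== PRECONDITION & SPEC =====
def Spec_plotting (A : Int) (B : Int) (out : List Int) : Prop := out = plotting_alt A B
instance (A : Int) (B : Int) (out : List Int) : Decidable (Spec_plotting A B out) := by unfold Spec_plotting; infer_instance

-- ===== CLAIM (what is proved, stated in full; the proofs are below) =====
def Claim_equal_plotting : Prop := ∀ (A : Int) (B : Int), Dom_plotting A B → Spec_plotting A B (plotting A B)

-- ===== LEMMAS AND PROOFS =====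

def pvG (A B i : Int) : Int := if i < A then 0 else if B < i then 0 else i

theorem plotting_eq_map (A B : Int) :
    plotting A B = (List.range 255).map (fun n : Nat => pvG A B (n : Int)) := by
  unfold plotting
  rw [show (fun (f : List Int) (i : Int) =>
        if i < A then f ++ [0] else if i > B then f ++ [0] else f ++ [i])
      = (fun f i => f ++ [pvG A B i]) by
    funext f i; simp only [pvG]; split_ifs with h1 h2 <;> simp_all]
  rw [PySem.List.foldl_append_singleton_eq_map, PySem.List.pyRange_one]
  simp [List.map_map, Function.comp_def]

theorem plotting_alt_eq_map (A B : Int) :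
    plotting_alt A B = (List.range 255).map (fun n : Nat => pvG A B (n : Int)) := by
  unfold plotting_alt
  by_cases h : min 254 B < max 0 A
  · rw [if_pos h]
    apply List.ext_getElem
    · simp only [List.length_replicate, List.length_map, List.length_range]
    · intro i hi1 hi2
      simp only [List.length_replicate] at hi1
      simp only [List.getElem_replicate, List.getElem_map, List.getElem_range]
      unfold pvG
      split_ifs with h1 h2 <;> omega
  · rw [if_neg h]
    apply List.ext_getElem
    · simp only [List.length_append, List.length_replicate, List.length_map,
        List.length_range', List.length_range]
      omega
    · intro i hi1 hi2
      simp only [List.length_append, List.length_replicate, List.length_map,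
        List.length_range'] at hi1
      simp only [List.length_map, List.length_range] at hi2
      simp only [List.getElem_append, List.getElem_map, List.getElem_range,
        List.getElem_replicate, List.length_append, List.length_replicate,
        List.length_map, List.length_range']
      split_ifs with h1 h2
      · unfold pvG; split_ifs with h3 h4 <;> omega
      · simp only [List.getElem_range']
        unfold pvG; split_ifs with h3 h4 <;> omega
      · unfold pvG; split_ifs with h3 h4 <;> omega

-- ===== VERDICT (by name: the statement is the Claim_ definition above) =====
theorem plotting_spec : Claim_equal_plotting := by
  intro A B _
  unfold Spec_plotting
  rw [plotting_eq_map, plotting_alt_eq_map]
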